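-- pv_equiv track=rewrite | github.com/b-ed-Fen/Session-bot-tg | tools.py | from_text_to_array_schedule
-- ===== SOURCE A (Python) =====
-- def from_text_to_array_schedule(message):
--     answer = []
--     temp = ''
--     temp_d = []
--     temp_w = []
--     number_of_blank_lines = 0
--
--     for i in message:
--         if i == '\n':
--             number_of_blank_lines = number_of_blank_lines + 1
--             if number_of_blank_lines == 1:  # следущее занятие
--                 temp_d.append(temp)
--                 temp = ''
--             if number_of_blank_lines == 2:  # следущий день
--                 temp_w.append(temp_d)
--                 temp_d = []
--             if number_of_blank_lines == 3:  # следущая неделя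
--                 answer.append(temp_w)
--                 temp_w = []
--         else:
--             temp = temp + i
--             number_of_blank_lines = 0
--
--     n = 0
--     while n < 2:
--         if not answer:
--             answer.append([])
--             answer.append([])
--
--         missing = 7 - len(answer[n])
--         for j in range(missing):
--             answer[n].append([''])
--         n += 1
--
--
--     return answer
-- ===== SOURCE B (Python) =====
-- def from_text_to_array_schedule(message):
--     # Segment-based rewrite: split the message into (text, newline-run-length)
--     # pairs in one scan, then flush per pair instead of a per-character counter
--     # state machine.  A trailing text segment with no following newline is
--     # dropped, as in the original.
--     answer = []
--     temp_w = []
--     temp_d = []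
--     i = 0
--     n = len(message)
--     while i < n:
--         j = i
--         while j < n and message[j] != '\n':
--             j += 1
--         if j == n:
--             break  # trailing text with no newline after it is dropped
--         k = j
--         while k < n and message[k] == '\n':
--             k += 1
--         run = k - j
--         temp_d.append(message[i:j])
--         if run >= 2:
--             temp_w.append(temp_d)
--             temp_d = []
--         if run >= 3:
--             answer.append(temp_w)
--             temp_w = []
--         i = k
--
--     if not answer:
--         answer = [[], []]
--     for m in range(2):
--         answer[m] = answer[m] + [['']] * (7 - len(answer[m]))
--     return answer
-- ===== Notes on version B (the rewrite author's own statement) =====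
-- stated objective: alternative
-- what changed: Replaces A's per-character blank-line-counter state machine by a single segment scan that slices the message into (text, newline-run-length) pairs and flushes lesson/day/week per pair; the padding step is kept.
-- outside the precondition, e.g. on from_text_to_array_schedule('a\n\n\nb'): A raises IndexError, B raises IndexError
import Mathlib
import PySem

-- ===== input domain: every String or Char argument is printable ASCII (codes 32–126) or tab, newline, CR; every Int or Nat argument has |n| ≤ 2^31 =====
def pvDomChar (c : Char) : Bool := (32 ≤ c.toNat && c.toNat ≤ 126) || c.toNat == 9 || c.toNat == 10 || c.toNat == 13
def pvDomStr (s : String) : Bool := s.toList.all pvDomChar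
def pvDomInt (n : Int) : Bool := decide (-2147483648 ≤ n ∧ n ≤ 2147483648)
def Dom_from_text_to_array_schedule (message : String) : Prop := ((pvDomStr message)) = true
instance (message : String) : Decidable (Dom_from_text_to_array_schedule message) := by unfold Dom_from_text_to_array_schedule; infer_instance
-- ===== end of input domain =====

-- B replaces A's per-character blank-line-counter state machine by a single
-- segment scan over (text, newline-run-length) pairs (objective: alternative).
-- Both pythons raise IndexError when the message has exactly one run of ≥3
-- newlines (answer has length 1, answer[1] is out of range); Pre_ excludes that.

-- ===== PORT A =====
-- State: (answer, temp, temp_d, temp_w, number_of_blank_lines).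
-- temp is kept as its list of characters (Python string concatenation, exact);
-- the three sequential `if b == k` tests are an if-chain here: b is a single
-- number after the increment, so at most one of them fires per character.
def stepA (st : List (List (List String)) × List Char × List String × List (List String) × Nat)
    (c : Char) : List (List (List String)) × List Char × List String × List (List String) × Nat :=
  match st with
  | (answer, temp, temp_d, temp_w, b) =>
    if c = '\n' then
      let b := b + 1
      if b = 1 then (answer, [], temp_d ++ [String.ofList temp], temp_w, b)
      else if b = 2 then (answer, temp, [], temp_w ++ [temp_d], b)
      else if b = 3 then (answer ++ [temp_w], temp, temp_d, [], b)
      else (answer, temp, temp_d, temp_w, b)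
    else (answer, temp ++ [c], temp_d, temp_w, 0)

def padRow (row : List (List String)) : List (List String) :=
  row ++ List.replicate (7 - row.length) [""]

-- One iteration of A's `while n < 2` loop.  Python's `answer[n]` raises
-- IndexError when n is out of range — those inputs are excluded by Pre_;
-- List.modify is a no-op there.
def padStepA (answer : List (List (List String))) (n : Nat) : List (List (List String)) :=
  let answer := if answer.isEmpty then [[], []] else answer
  answer.modify n padRow

def from_text_to_array_schedule (message : String) : List (List (List String)) :=
  let st := message.toList.foldl stepA ([], [], [], [], 0)
  padStepA (padStepA st.1 0) 1

-- ===== PORT B =====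
-- Source B's scanning loop: split the character list into (text, run-length)
-- pairs, one per maximal newline run; a trailing text with no newline is dropped.
def pairsB (cs : List Char) : List (List Char × Nat) :=
  let t := cs.takeWhile (· ≠ '\n')
  let rest := cs.dropWhile (· ≠ '\n')
  if h : rest.isEmpty then []
  else
    let r := rest.takeWhile (· = '\n')
    let rest2 := rest.dropWhile (· = '\n')
    (t, r.length) :: pairsB rest2
termination_by cs.length
decreasing_by
  have h1 : rest.length ≤ cs.length := List.length_dropWhile_le _ _
  obtain ⟨a, l, hr⟩ : ∃ a l, rest = a :: l := by
    cases hrest : rest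
    · rw [hrest] at h; simp at h
    · exact ⟨_, _, rfl⟩
  have h4 : a = '\n' := by
    have hh := List.head?_dropWhile_not (fun c => decide (c ≠ '\n')) cs
    rw [show List.dropWhile (fun c => decide (c ≠ '\n')) cs = a :: l from hr] at hh
    simpa using hh
  have h5 : rest.dropWhile (· = '\n') = l.dropWhile (· = '\n') := by
    rw [hr]; simp [List.dropWhile, h4]
  have h6 := List.length_dropWhile_le (fun c => decide (c = '\n')) l
  have h7 : rest.length = l.length + 1 := by rw [hr]; simp
  calc (rest.dropWhile (· = '\n')).length
      = (l.dropWhile (· = '\n')).length := by rw [h5]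
    _ < cs.length := by omega

def stepB (st : List (List (List String)) × List String × List (List String))
    (p : List Char × Nat) : List (List (List String)) × List String × List (List String) :=
  match st with
  | (answer, temp_d, temp_w) =>
    let temp_d := temp_d ++ [String.ofList p.1]
    let (temp_w, temp_d) :=
      if 2 ≤ p.2 then (temp_w ++ [temp_d], ([] : List String)) else (temp_w, temp_d)
    let (answer, temp_w) :=
      if 3 ≤ p.2 then (answer ++ [temp_w], ([] : List (List String))) else (answer, temp_w)
    (answer, temp_d, temp_w)

def from_text_to_array_schedule_alt (message : String) : List (List (List String)) :=
  let st := (pairsB message.toList).foldl stepB ([], [], [])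
  let answer := if st.1.isEmpty then [[], []] else st.1
  (answer.modify 0 padRow).modify 1 padRow

-- ===== PRECONDITION & SPEC =====
-- Number of maximal runs of ≥ 3 consecutive newlines (a structural pattern
-- count on the input, independent of both ports): `run` is the length of the
-- current newline run.
def countRuns3 : List Char → Nat → Nat
  | [], run => if 3 ≤ run then 1 else 0
  | c :: cs, run =>
    if c = '\n' then countRuns3 cs (run + 1)
    else (if 3 ≤ run then 1 else 0) + countRuns3 cs 0

-- Pre_ excludes exactly the inputs on which the Python A raises IndexError
-- (a message with exactly one run of ≥ 3 newlines makes `answer` a singleton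
-- and `answer[1]` out of range); B raises there too.
def Pre_from_text_to_array_schedule (message : String) : Prop :=
  countRuns3 message.toList 0 ≠ 1

instance (message : String) : Decidable (Pre_from_text_to_array_schedule message) := by
  unfold Pre_from_text_to_array_schedule; infer_instance

def pvWitness_from_text_to_array_schedule : String := "a\nb\n\nc"

def Spec_from_text_to_array_schedule (message : String) (out : List (List (List String))) : Prop := out = from_text_to_array_schedule_alt message
instance (message : String) (out : List (List (List String))) : Decidable (Spec_from_text_to_array_schedule message out) := by unfold Spec_from_text_to_array_schedule; infer_instance

-- ===== CLAIM (what is proved, stated in full; the proofs are below) =====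
def Claim_equal_from_text_to_array_schedule : Prop := ∀ (message : String), Dom_from_text_to_array_schedule message → Pre_from_text_to_array_schedule message → Spec_from_text_to_array_schedule message (from_text_to_array_schedule message)

-- ===== LEMMAS AND PROOFS =====

-- the components of the A-state that survive into the answer
def projA (st : List (List (List String)) × List Char × List String × List (List String) × Nat) :
    List (List (List String)) × List String × List (List String) :=
  (st.1, st.2.2.1, st.2.2.2.1)

theorem foldl_stepA_text (t : List Char) (ht : ∀ c ∈ t, c ≠ '\n') :
    ∀ (ans : List (List (List String))) (temp : List Char) (d : List String)
      (w : List (List String)) (b : Nat),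
      List.foldl stepA (ans, temp, d, w, b) t =
        (ans, temp ++ t, d, w, if t = [] then b else 0) := by
  induction t with
  | nil => intro ans temp d w b; simp
  | cons c t ih =>
    intro ans temp d w b
    have hc : c ≠ '\n' := ht c (by simp)
    have ht' : ∀ x ∈ t, x ≠ '\n' := fun x hx => ht x (by simp [hx])
    simp only [List.foldl_cons, stepA, if_neg hc]
    rw [ih ht']
    simp

theorem stepA_nl_high (ans : List (List (List String))) (temp : List Char)
    (d : List String) (w : List (List String)) (b : Nat) (hb : 3 ≤ b) :
    stepA (ans, temp, d, w, b) '\n' = (ans, temp, d, w, b + 1) := by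
  have h1 : ¬ (b + 1 = 1) := by omega
  have h2 : ¬ (b + 1 = 2) := by omega
  have h3 : ¬ (b + 1 = 3) := by omega
  simp [stepA, h2, h3]
  omega

theorem foldl_stepA_high (m : Nat) :
    ∀ (ans : List (List (List String))) (temp : List Char) (d : List String)
      (w : List (List String)) (b : Nat), 3 ≤ b →
      List.foldl stepA (ans, temp, d, w, b) (List.replicate m '\n') =
        (ans, temp, d, w, b + m) := by
  induction m with
  | zero => intro ans temp d w b _; simp
  | succ m ih =>
    intro ans temp d w b hb
    rw [List.replicate_succ, List.foldl_cons, stepA_nl_high _ _ _ _ _ hb,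
      ih _ _ _ _ _ (by omega)]
    simp; omega

theorem foldl_stepA_run (k : Nat) (hk : 1 ≤ k) (ans : List (List (List String)))
    (temp : List Char) (d : List String) (w : List (List String)) :
    List.foldl stepA (ans, temp, d, w, 0) (List.replicate k '\n') =
      ((stepB (ans, d, w) (temp, k)).1, [], (stepB (ans, d, w) (temp, k)).2.1,
       (stepB (ans, d, w) (temp, k)).2.2, k) := by
  match k, hk with
  | 1, _ => simp [stepB, List.replicate, stepA]
  | 2, _ => simp [stepB, List.replicate, stepA]
  | (m + 3), _ =>
    have hrep : List.replicate (m + 3) '\n' =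
        '\n' :: '\n' :: '\n' :: List.replicate m '\n' := by
      rw [show m + 3 = 3 + m by omega, List.replicate_add]; rfl
    have e1 : stepA (ans, temp, d, w, 0) '\n' =
        (ans, [], d ++ [String.ofList temp], w, 1) := by simp [stepA]
    have e2 : stepA (ans, [], d ++ [String.ofList temp], w, 1) '\n' =
        (ans, [], [], w ++ [d ++ [String.ofList temp]], 2) := by simp [stepA]
    have e3 : stepA (ans, [], [], w ++ [d ++ [String.ofList temp]], 2) '\n' =
        (ans ++ [w ++ [d ++ [String.ofList temp]]], [], [], [], 3) := by simp [stepA]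
    have hc2 : 2 ≤ m + 3 := by omega
    have hc3 : 3 ≤ m + 3 := by omega
    rw [hrep, List.foldl_cons, e1, List.foldl_cons, e2, List.foldl_cons, e3,
      foldl_stepA_high m _ _ _ _ 3 (by omega)]
    simp [stepB, hc2, hc3]
    omega

theorem head_dropWhile_ne (cs : List Char) (a : Char) (l : List Char)
    (h : cs.dropWhile (· ≠ '\n') = a :: l) : a = '\n' := by
  have := List.head?_dropWhile_not (fun c => decide (c ≠ '\n')) cs
  rw [h] at this; simpa using this

theorem pairsB_rest_nil (cs : List Char) (h : cs.dropWhile (· ≠ '\n') = []) :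
    pairsB cs = [] := by
  rw [pairsB, h]
  simp

theorem pairsB_rest_cons (cs : List Char) (a : Char) (l : List Char)
    (h : cs.dropWhile (· ≠ '\n') = a :: l) :
    pairsB cs = (cs.takeWhile (· ≠ '\n'), ((a :: l).takeWhile (· = '\n')).length) ::
      pairsB ((a :: l).dropWhile (· = '\n')) := by
  rw [pairsB, h]
  simp

theorem main_loop (n : Nat) : ∀ (cs : List Char), cs.length ≤ n →
    ∀ (ans : List (List (List String))) (d : List String) (w : List (List String)) (b : Nat),
      (cs.head? ≠ some '\n' ∨ b = 0) →
      projA (List.foldl stepA (ans, [], d, w, b) cs) =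
        List.foldl stepB (ans, d, w) (pairsB cs) := by
  induction n with
  | zero =>
    intro cs hcs ans d w b _
    have : cs = [] := List.length_eq_zero_iff.mp (Nat.le_zero.mp hcs)
    subst this; simp [pairsB_rest_nil, projA]
  | succ n ih =>
    intro cs hcs ans d w b hb
    have hsplit : cs.takeWhile (· ≠ '\n') ++ cs.dropWhile (· ≠ '\n') = cs :=
      List.takeWhile_append_dropWhile
    have ht : ∀ c ∈ cs.takeWhile (· ≠ '\n'), c ≠ '\n' := by
      intro c hc
      simpa using List.mem_takeWhile_imp hc
    cases hr : cs.dropWhile (· ≠ '\n') with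
    | nil =>
      -- no newline left: the trailing text only changes temp, which projA discards
      rw [hr] at hsplit
      rw [pairsB_rest_nil cs hr, ← hsplit, List.append_nil, List.foldl_nil,
        foldl_stepA_text _ ht]
      simp [projA]
    | cons a l =>
      have ha : a = '\n' := head_dropWhile_ne cs a l hr
      obtain ⟨t, htdef⟩ : ∃ t, cs.takeWhile (· ≠ '\n') = t := ⟨_, rfl⟩
      obtain ⟨k, hkdef⟩ : ∃ k, ((a :: l).takeWhile (· = '\n')).length = k := ⟨_, rfl⟩
      obtain ⟨r2, hr2def⟩ : ∃ r2, (a :: l).dropWhile (· = '\n') = r2 := ⟨_, rfl⟩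
      have ht' : ∀ c ∈ t, c ≠ '\n' := by
        intro c hc; rw [← htdef] at hc; exact ht c hc
      have hcseq : cs = t ++ a :: l := by rw [← htdef, ← hr]; exact hsplit.symm
      have hsplit2 : List.replicate k '\n' ++ r2 = a :: l := by
        rw [← hkdef, ← hr2def]
        conv_rhs => rw [← List.takeWhile_append_dropWhile (p := (· = '\n')) (l := a :: l)]
        congr 1
        exact (List.eq_replicate_of_mem
          (fun c hc => by simpa using List.mem_takeWhile_imp hc)).symm
      have hk1 : 1 ≤ k := by rw [← hkdef]; simp [List.takeWhile, ha]
      have hlen2 : r2.length ≤ n := by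
        have h1 := congrArg List.length hcseq
        have h2 := congrArg List.length hsplit2
        simp at h1 h2
        omega
      have hb0 : (if t = [] then b else 0) = 0 := by
        rcases hb with hb | hb
        · rw [if_neg]
          intro h0
          rw [h0] at hcseq
          rw [hcseq] at hb
          simp [ha] at hb
        · simp [hb]
      have hhead2 : r2.head? ≠ some '\n' := by
        cases hr2 : r2 with
        | nil => simp
        | cons x xs =>
          have hh := List.head?_dropWhile_not (fun c => decide (c = '\n')) (a :: l)
          rw [show List.dropWhile (fun c => decide (c = '\n')) (a :: l) = x :: xs from
            hr2def.trans hr2] at hh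
          simpa using hh
      rw [pairsB_rest_cons cs a l hr, htdef, hkdef, hr2def]
      rw [hcseq, List.foldl_append, foldl_stepA_text _ ht', hb0]
      simp only [List.nil_append]
      rw [← hsplit2, List.foldl_append, foldl_stepA_run _ hk1, List.foldl_cons]
      exact ih _ hlen2 _ _ _ _ (Or.inl hhead2)

theorem pad_eq (a : List (List (List String))) :
    padStepA (padStepA a 0) 1 =
      ((if a.isEmpty then [[], []] else a).modify 0 padRow).modify 1 padRow := by
  match a with
  | [] => simp [padStepA]
  | x :: xs => simp [padStepA, List.modify]

-- ===== VERDICT (by name: the statement is the Claim_ definition above) =====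
theorem from_text_to_array_schedule_spec : Claim_equal_from_text_to_array_schedule := by
  intro message _ _
  unfold Spec_from_text_to_array_schedule
  unfold from_text_to_array_schedule from_text_to_array_schedule_alt
  have h := main_loop message.toList.length message.toList (le_refl _) [] [] [] 0 (Or.inr rfl)
  have h1 : (List.foldl stepA ([], [], [], [], 0) message.toList).1 =
      (List.foldl stepB ([], [], []) (pairsB message.toList)).1 := by
    have := congrArg Prod.fst h
    simpa [projA] using this
  rw [pad_eq, h1]
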